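-- pv_equiv track=rewrite | github.com/aguswake1/Computer-Science-UBA | 1C/introduccionALaProgramacion/practicas/practica_ocho.py | es_legible
-- ===== SOURCE A (Python) =====
-- def es_legible(palabra: str) -> bool:
--     tiene_letra: bool = False
--     tiene_num: bool = False
--     tiene_undscore: bool = False
--
--     for caracter in palabra:
--         if "a" <= caracter <= "z" or "A" <= caracter <= "Z":
--             tiene_letra = True
--         elif "9" >= caracter >= "0":
--             tiene_num = True
--         elif caracter == "_":
--             tiene_undscore = True
--         else:
--             return False
--     return len(palabra) >= 5 and tiene_letra and tiene_num and tiene_undscore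
-- ===== SOURCE B (Python) =====
-- def es_legible(palabra: str) -> bool:
--     valido = all('a' <= c <= 'z' or 'A' <= c <= 'Z' or '0' <= c <= '9' or c == '_' for c in palabra)
--     tiene_letra = any('a' <= c <= 'z' or 'A' <= c <= 'Z' for c in palabra)
--     tiene_num = any('0' <= c <= '9' for c in palabra)
--     tiene_undscore = any(c == '_' for c in palabra)
--     return len(palabra) >= 5 and valido and tiene_letra and tiene_num and tiene_undscore
-- ===== Notes on version B (the rewrite author's own statement) =====
-- stated objective: idiomatic
-- what changed: Replaces A's single fused guarded loop with early return and three mutable flags by four independent all/any scans over the string combined in one final boolean expression.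
import Mathlib
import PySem

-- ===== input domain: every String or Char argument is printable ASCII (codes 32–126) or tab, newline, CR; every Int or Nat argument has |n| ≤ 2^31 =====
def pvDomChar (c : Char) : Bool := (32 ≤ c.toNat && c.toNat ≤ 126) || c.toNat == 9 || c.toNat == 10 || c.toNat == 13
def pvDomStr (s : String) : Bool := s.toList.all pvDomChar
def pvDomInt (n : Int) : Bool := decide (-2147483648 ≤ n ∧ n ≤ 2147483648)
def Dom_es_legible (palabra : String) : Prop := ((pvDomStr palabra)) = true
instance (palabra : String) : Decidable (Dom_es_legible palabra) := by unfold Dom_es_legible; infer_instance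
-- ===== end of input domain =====

-- B replaces A's single fused guarded loop (early return + three mutable flags) by four
-- independent all/any scans combined in one final boolean expression (idiomatic; same cost).

-- ===== PORT A =====
def aLetra (c : Char) : Bool := ('a' ≤ c && c ≤ 'z') || ('A' ≤ c && c ≤ 'Z')
def aNum (c : Char) : Bool := ('9' ≥ c && c ≥ '0')
def esLoop (n : Nat) : List Char → Bool → Bool → Bool → Bool
  | [], tl, tn, tu => decide (n ≥ 5) && tl && tn && tu
  | c :: cs, tl, tn, tu =>
    if aLetra c then esLoop n cs true tn tu
    else if aNum c then esLoop n cs tl true tu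
    else if c == '_' then esLoop n cs tl tn true
    else false
def es_legible (palabra : String) : Bool :=
  esLoop palabra.toList.length palabra.toList false false false

-- ===== PORT B =====
def bValido (c : Char) : Bool := ('a' ≤ c && c ≤ 'z') || ('A' ≤ c && c ≤ 'Z') || ('0' ≤ c && c ≤ '9') || c == '_'
def bLetra (c : Char) : Bool := ('a' ≤ c && c ≤ 'z') || ('A' ≤ c && c ≤ 'Z')
def bNum (c : Char) : Bool := ('0' ≤ c && c ≤ '9')
def es_legible_alt (palabra : String) : Bool :=
  let l := palabra.toList
  decide (l.length ≥ 5) && l.all bValido && l.any bLetra && l.any bNum && l.any (fun c => c == '_')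

-- ===== PRECONDITION & SPEC =====
def Spec_es_legible (palabra : String) (out : Bool) : Prop := out = es_legible_alt palabra
instance (palabra : String) (out : Bool) : Decidable (Spec_es_legible palabra out) := by unfold Spec_es_legible; infer_instance

-- ===== CLAIM (what is proved, stated in full; the proofs are below) =====
def Claim_equal_es_legible : Prop := ∀ (palabra : String), Dom_es_legible palabra → Spec_es_legible palabra (es_legible palabra)

-- ===== LEMMAS AND PROOFS =====
theorem aLetra_disj (c : Char) (h : aLetra c = true) : aNum c = false ∧ (c == '_') = false := by
  simp [aLetra, aNum, Char.le_def, Char.ext_iff, UInt32.le_iff_toNat_le, ← UInt32.toNat_inj] at *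
  omega

theorem aNum_disj (c : Char) (h : aNum c = true) : (c == '_') = false := by
  simp [aNum, Char.le_def, Char.ext_iff, UInt32.le_iff_toNat_le, ← UInt32.toNat_inj] at *
  omega

theorem bValido_eq (c : Char) : bValido c = (aLetra c || aNum c || c == '_') := by
  simp [bValido, aLetra, aNum, Char.le_def, Bool.and_comm]

theorem bLetra_eq (c : Char) : bLetra c = aLetra c := rfl

theorem bNum_eq (c : Char) : bNum c = aNum c := by
  simp [bNum, aNum, Char.le_def, Bool.and_comm]

theorem loop_eq (n : Nat) (l : List Char) (tl tn tu : Bool) :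
    esLoop n l tl tn tu =
      (l.all bValido && (decide (n ≥ 5) && (tl || l.any bLetra) && (tn || l.any bNum)
        && (tu || l.any (fun c => c == '_')))) := by
  induction l generalizing tl tn tu with
  | nil => cases tl <;> cases tn <;> cases tu <;> simp [esLoop]
  | cons c cs ih =>
    simp only [esLoop, List.all_cons, List.any_cons]
    by_cases h1 : aLetra c = true
    · obtain ⟨h2, h3⟩ := aLetra_disj c h1
      rw [ih]
      simp [bValido_eq, bLetra_eq, bNum_eq, h1, h2, h3]
    · by_cases h2 : aNum c = true
      · have h3 := aNum_disj c h2
        rw [if_neg h1, if_pos h2, ih]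
        simp [bValido_eq, bLetra_eq, bNum_eq, h1, h2, h3]
      · by_cases h3 : (c == '_') = true
        · rw [if_neg h1, if_neg h2, if_pos h3, ih]
          simp [bValido_eq, bLetra_eq, bNum_eq, h1, h2, h3]
        · rw [if_neg h1, if_neg h2, if_neg h3]
          simp [bValido_eq, bLetra_eq, bNum_eq, h1, h2, h3]

-- ===== VERDICT (by name: the statement is the Claim_ definition above) =====
theorem es_legible_spec : Claim_equal_es_legible := by
  intro palabra _
  unfold Spec_es_legible es_legible es_legible_alt
  rw [loop_eq]
  cases h : palabra.toList.all bValido <;> simp [h]
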